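-- pv_equiv track=rewrite | github.com/pytorch/torchtitan | torchtitan/experiments/graph_trainer/tests/test_graph_pp.py | assign_logical_stages_to_pp_rank
-- ===== SOURCE A (Python) =====
-- def assign_logical_stages_to_pp_rank(
--     schedule_name: str, pp_degree: int, stages_per_rank: int
-- ) -> dict[int, list[int]]:
--     style = "v" if schedule_name in ("ZBVZeroBubble", "DualPipeV") else "loop"
--     if style == "loop":
--         pp_rank_to_stage_indices = {
--             pp_rank: [pp_rank + s * pp_degree for s in range(stages_per_rank)]
--             for pp_rank in range(pp_degree)
--         }
--     elif style == "v":
--         total_pp_stages = pp_degree * stages_per_rank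
--         pp_rank_to_stage_indices = {
--             pp_rank: [pp_rank, total_pp_stages - 1 - pp_rank]
--             for pp_rank in range(pp_degree)
--         }
--     return pp_rank_to_stage_indices
-- ===== SOURCE B (Python) =====
-- def assign_logical_stages_to_pp_rank(schedule_name, pp_degree, stages_per_rank):
--     if schedule_name in ("ZBVZeroBubble", "DualPipeV"):
--         total = pp_degree * stages_per_rank
--         return {r: [r, total - 1 - r] for r in range(pp_degree)}
--     if pp_degree <= 0:
--         return {}
--     # group the flat stage indices by owning rank: stable-sort them by rank,
--     # then each rank's stages form one contiguous chunk of the sorted order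
--     order = sorted(range(pp_degree * stages_per_rank), key=lambda i: i % pp_degree)
--     return {
--         r: order[r * stages_per_rank:(r + 1) * stages_per_rank]
--         for r in range(pp_degree)
--     }
-- ===== Notes on version B (the rewrite author's own statement) =====
-- stated objective: alternative
-- what changed: The 'loop' style is computed by stably sorting the flat stage indices by their owning rank (key i % pp_degree) and then slicing the sorted order into contiguous stages_per_rank-sized chunks, one per rank, instead of A's per-rank arithmetic-progression comprehension pp_rank + s*pp_degree.
import Mathlib
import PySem

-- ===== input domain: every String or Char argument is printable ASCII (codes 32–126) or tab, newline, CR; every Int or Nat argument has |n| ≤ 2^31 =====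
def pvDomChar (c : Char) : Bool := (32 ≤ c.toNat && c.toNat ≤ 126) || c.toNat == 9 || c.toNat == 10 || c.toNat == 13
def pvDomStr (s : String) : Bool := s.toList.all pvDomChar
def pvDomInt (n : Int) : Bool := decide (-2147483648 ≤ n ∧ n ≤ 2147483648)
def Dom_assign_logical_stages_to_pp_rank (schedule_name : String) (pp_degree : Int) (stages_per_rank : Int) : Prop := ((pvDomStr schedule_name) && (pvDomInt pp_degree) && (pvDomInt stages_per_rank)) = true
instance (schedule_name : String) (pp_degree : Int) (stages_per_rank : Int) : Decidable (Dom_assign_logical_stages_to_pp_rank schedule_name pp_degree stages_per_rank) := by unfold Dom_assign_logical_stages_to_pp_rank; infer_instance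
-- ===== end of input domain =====

-- B computes the 'loop' style by stably sorting the flat stage indices by owning rank (i % pp_degree)
-- and slicing the sorted order into contiguous per-rank chunks, instead of A's per-rank
-- arithmetic-progression comprehension; an alternative of similar size, not claimed faster.

-- ===== PORT A =====
def assign_logical_stages_to_pp_rank (schedule_name : String) (pp_degree : Int) (stages_per_rank : Int) : List (Int × List Int) :=
  let style := if schedule_name == "ZBVZeroBubble" || schedule_name == "DualPipeV" then "v" else "loop"
  if style == "loop" then
    ((PySem.List.pyRange 0 pp_degree).foldl
      (fun d pp_rank => d.insert pp_rank
        ((PySem.List.pyRange 0 stages_per_rank).map (fun s => pp_rank + s * pp_degree)))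
      PySem.Dict.empty).items
  else
    let total_pp_stages := pp_degree * stages_per_rank
    ((PySem.List.pyRange 0 pp_degree).foldl
      (fun d pp_rank => d.insert pp_rank [pp_rank, total_pp_stages - 1 - pp_rank])
      PySem.Dict.empty).items

-- ===== PORT B =====
def assign_logical_stages_to_pp_rank_alt (schedule_name : String) (pp_degree : Int) (stages_per_rank : Int) : List (Int × List Int) :=
  if schedule_name == "ZBVZeroBubble" || schedule_name == "DualPipeV" then
    let total := pp_degree * stages_per_rank
    ((PySem.List.pyRange 0 pp_degree).foldl
      (fun d r => d.insert r [r, total - 1 - r]) PySem.Dict.empty).items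
  else
    if pp_degree ≤ 0 then []
    else
    let order := PySem.List.sorted (PySem.List.pyRange 0 (pp_degree * stages_per_rank))
      (fun i => PySem.Int.mod i pp_degree) false
    ((PySem.List.pyRange 0 pp_degree).foldl
      (fun d r => d.insert r
        (PySem.List.slice order (some (r * stages_per_rank)) (some ((r + 1) * stages_per_rank))))
      PySem.Dict.empty).items

-- ===== PRECONDITION & SPEC =====
def Spec_assign_logical_stages_to_pp_rank (schedule_name : String) (pp_degree : Int) (stages_per_rank : Int) (out : List (Int × List Int)) : Prop := out = assign_logical_stages_to_pp_rank_alt schedule_name pp_degree stages_per_rank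
instance (schedule_name : String) (pp_degree : Int) (stages_per_rank : Int) (out : List (Int × List Int)) : Decidable (Spec_assign_logical_stages_to_pp_rank schedule_name pp_degree stages_per_rank out) := by unfold Spec_assign_logical_stages_to_pp_rank; infer_instance

-- ===== CLAIM (what is proved, stated in full; the proofs are below) =====
def Claim_equal_assign_logical_stages_to_pp_rank : Prop := ∀ (schedule_name : String) (pp_degree : Int) (stages_per_rank : Int), Dom_assign_logical_stages_to_pp_rank schedule_name pp_degree stages_per_rank → Spec_assign_logical_stages_to_pp_rank schedule_name pp_degree stages_per_rank (assign_logical_stages_to_pp_rank schedule_name pp_degree stages_per_rank)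

-- ===== LEMMAS AND PROOFS =====

-- Python's i % p is Int.emod for a positive divisor p
theorem pv_mod_eq_emod (i p : Int) (hp : 0 < p) : PySem.Int.mod i p = i % p := by
  unfold PySem.Int.mod
  rw [Int.fmod_eq_emod]
  simp [hp.le]

theorem pv_mod_bounds (i p : Int) (hp : 0 < p) :
    0 ≤ PySem.Int.mod i p ∧ PySem.Int.mod i p < p := by
  rw [pv_mod_eq_emod i p hp]
  exact ⟨Int.emod_nonneg i (by omega), Int.emod_lt_of_pos i hp⟩

theorem pv_range_filter_beq (n m : Nat) (h : m < n) :
    (List.range n).filter (fun t => t == m) = [m] := by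
  induction n with
  | zero => omega
  | succ n ih =>
      rw [List.range_succ, List.filter_append]
      by_cases hm : m < n
      · rw [ih hm]
        have h1 : (List.filter (fun t => t == m) [n]) = [] := by
          simp; omega
        rw [h1, List.append_nil]
      · have hmn : m = n := by omega
        subst hmn
        have h1 : (List.range m).filter (fun t => t == m) = [] := by
          rw [List.filter_eq_nil_iff]; intro a ha; simp at ha ⊢; omega
        rw [h1]
        simp

-- one block of p consecutive stage indices contributes exactly one stage of residue r
theorem pv_filter_block (p k r : Nat) (hr : r < p) :
    (PySem.List.pyRange ((p : Int) * k) ((p : Int) * k + p)).filter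
      (fun i => PySem.Int.mod i p == (r : Int)) = [(p : Int) * k + r] := by
  have hpn : 0 < p := by omega
  have hppos : (0 : Int) < p := by exact_mod_cast hpn
  rw [PySem.List.pyRange_one]
  have hp : ((p : Int) * k + p - (p : Int) * k).toNat = p := by omega
  rw [hp, List.filter_map]
  have hcongr : ∀ t ∈ List.range p,
      ((fun i => PySem.Int.mod i p == (r : Int)) ∘ (fun t : Nat => (p : Int) * k + (t : Int))) t
        = (t == r) := by
    intro t ht
    simp only [List.mem_range] at ht
    simp only [Function.comp]
    have hmod : PySem.Int.mod ((p : Int) * k + t) p = (t : Int) := by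
      rw [pv_mod_eq_emod _ _ hppos, add_comm, Int.add_mul_emod_self_left]
      exact Int.emod_eq_of_lt (by positivity) (by exact_mod_cast ht)
    rw [hmod]
    simp
  rw [List.filter_congr hcongr, pv_range_filter_beq p r hr]
  simp

-- the stage indices of residue r, in order, are A's arithmetic progression for rank r
theorem pv_filter_range (p k r : Nat) (hr : r < p) :
    (PySem.List.pyRange 0 ((p : Int) * k)).filter
      (fun i => PySem.Int.mod i p == (r : Int))
      = (List.range k).map (fun s : Nat => ((r : Int) + (s : Int) * p)) := by
  induction k with
  | zero => simp [PySem.List.pyRange_one_eq_nil]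
  | succ k ih =>
      have hsplit : PySem.List.pyRange 0 ((p : Int) * ((k + 1 : Nat) : Int))
          = PySem.List.pyRange 0 ((p : Int) * k)
            ++ PySem.List.pyRange ((p : Int) * k) ((p : Int) * k + p) := by
        have h2 : (p : Int) * ((k + 1 : Nat) : Int) = (p : Int) * k + p := by push_cast; ring
        rw [h2]
        exact PySem.List.pyRange_one_append 0 ((p : Int) * k) ((p : Int) * k + p)
          (by positivity) (by omega)
      rw [hsplit, List.filter_append, ih, pv_filter_block p k r hr, List.range_succ,
        List.map_append]
      simp only [List.map_cons, List.map_nil]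
      congr 2
      ring

-- insertBy places x after every element it is not 'before' and before the rest
theorem pv_insertBy_middle {α : Type} (before : α → α → Bool) (x : α) (L1 L2 : List α)
    (h1 : ∀ y ∈ L1, before x y = false) (h2 : ∀ y ∈ L2, before x y = true) :
    PySem.List.insertBy before x (L1 ++ L2) = L1 ++ x :: L2 := by
  induction L1 with
  | nil =>
      cases L2 with
      | nil => rfl
      | cons z zs =>
          simp only [List.nil_append]
          show (if before x z = true then x :: z :: zs else z :: PySem.List.insertBy before x zs) = _
          rw [if_pos (h2 z (by simp))]
  | cons y ys ih =>
      simp only [List.cons_append]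
      show (if before x y = true then x :: y :: (ys ++ L2)
            else y :: PySem.List.insertBy before x (ys ++ L2)) = _
      rw [if_neg (by rw [h1 y (by simp)]; simp),
        ih (fun z hz => h1 z (by simp [hz]))]

-- stable sort = the key classes concatenated in increasing key order, each in original order
theorem pv_stable_sort_classes {α : Type} (key : α → Int) (ks : List Int)
    (hks : ks.Pairwise (· < ·)) :
    ∀ (xs : List α), (∀ x ∈ xs, key x ∈ ks) →
      PySem.List.sorted xs key false
        = ks.flatMap (fun k => xs.filter (fun x => key x == k)) := by
  intro xs
  induction xs using List.reverseRecOn with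
  | nil =>
      intro _
      have h0 : PySem.List.sorted ([] : List α) key false = [] := rfl
      rw [h0]
      simp
  | append_singleton xs a ih =>
      intro hcov
      have hmem : key a ∈ ks := hcov a (by simp)
      obtain ⟨ks1, ks2, hsplit⟩ := List.append_of_mem hmem
      subst hsplit
      have hpw := hks
      rw [List.pairwise_append] at hpw
      obtain ⟨hpw1, hpw2, hcross⟩ := hpw
      rw [List.pairwise_cons] at hpw2
      have hlt1 : ∀ k ∈ ks1, k < key a := fun k hk => hcross k hk (key a) (by simp)
      have hlt2 : ∀ k ∈ ks2, key a < k := hpw2.1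
      have hstep : PySem.List.sorted (xs ++ [a]) key false
          = PySem.List.insertBy (fun u v => decide (key u < key v)) a
              (PySem.List.sorted xs key false) := by
        rw [PySem.List.sorted_eq_foldl_insertBy, PySem.List.sorted_eq_foldl_insertBy,
          List.foldl_append]
        rfl
      have hcov' : ∀ x ∈ xs, key x ∈ ks1 ++ key a :: ks2 := fun x hx => hcov x (by simp [hx])
      rw [hstep, ih hcov']
      -- rewrite the class decomposition of xs as  L1 ++ L2
      have hdec : (ks1 ++ key a :: ks2).flatMap (fun k => xs.filter (fun x => key x == k))
          = (ks1.flatMap (fun k => xs.filter (fun x => key x == k))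
              ++ xs.filter (fun x => key x == key a))
            ++ ks2.flatMap (fun k => xs.filter (fun x => key x == k)) := by
        simp [List.flatMap_append]
      rw [hdec, pv_insertBy_middle]
      · -- the target decomposition for xs ++ [a]
        have hnew : ∀ k : Int, (xs ++ [a]).filter (fun x => key x == k)
            = xs.filter (fun x => key x == k) ++ (if key a = k then [a] else []) := by
          intro k
          rw [List.filter_append]
          congr 1
          by_cases h : key a = k <;> simp [h]
        have hflat : ∀ (ks' : List Int), (∀ k ∈ ks', key a ≠ k) →
            ks'.flatMap (fun k => (xs ++ [a]).filter (fun x => key x == k))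
              = ks'.flatMap (fun k => xs.filter (fun x => key x == k)) := by
          intro ks' h
          induction ks' with
          | nil => rfl
          | cons c cs ihc =>
              simp only [List.flatMap_cons]
              rw [hnew c, if_neg (h c (by simp)), List.append_nil,
                ihc (fun k hk => h k (by simp [hk]))]
        rw [List.flatMap_append, List.flatMap_cons,
          hflat ks1 (fun k hk => ne_of_gt (hlt1 k hk)),
          hflat ks2 (fun k hk => ne_of_lt (hlt2 k hk)),
          hnew (key a), if_pos rfl]
        simp [List.append_assoc]
      · -- everything of key ≤ key a stays before a
        intro y hy
        simp only [List.mem_append, List.mem_flatMap, List.mem_filter] at hy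
        rcases hy with ⟨k, hk, _, hky⟩ | ⟨_, hky⟩
        · have : key y = k := by simpa using hky
          simp [this]
          exact le_of_lt (hlt1 k hk)
        · have : key y = key a := by simpa using hky
          simp [this]
      · -- everything of key > key a comes after a
        intro y hy
        simp only [List.mem_flatMap, List.mem_filter] at hy
        obtain ⟨k, hk, _, hky⟩ := hy
        have : key y = k := by simpa using hky
        simp [this]
        exact hlt2 k hk

-- the 'loop' branch for a positive pp_degree: A's dict equals B's sort-and-slice dict
theorem pv_loop_branch (p : Nat) (hp : 0 < p) (spr : Int) :
    ((PySem.List.pyRange 0 (p : Int)).foldl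
      (fun d pp_rank => d.insert pp_rank
        ((PySem.List.pyRange 0 spr).map (fun s => pp_rank + s * (p : Int))))
      PySem.Dict.empty).items
    = ((PySem.List.pyRange 0 (p : Int)).foldl
        (fun d r => d.insert r
          (PySem.List.slice
            (PySem.List.sorted (PySem.List.pyRange 0 ((p : Int) * spr))
              (fun i => PySem.Int.mod i (p : Int)) false)
            (some (r * spr)) (some ((r + 1) * spr))))
        PySem.Dict.empty).items := by
  have hppos : (0 : Int) < p := by exact_mod_cast hp
  have hnodup : ((PySem.List.pyRange 0 (p : Int)).map (fun a => a)).Nodup := by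
    simpa using PySem.List.nodup_pyRange_one 0 p
  rw [PySem.Dict.items_foldl_insert_fresh (PySem.List.pyRange 0 (p : Int)) (fun a => a)
      (fun r => (PySem.List.pyRange 0 spr).map (fun s => r + s * (p : Int)))
      PySem.Dict.empty (fun a _ => PySem.Dict.contains_empty a) hnodup,
    PySem.Dict.items_foldl_insert_fresh (PySem.List.pyRange 0 (p : Int)) (fun a => a)
      (fun r => PySem.List.slice
        (PySem.List.sorted (PySem.List.pyRange 0 ((p : Int) * spr))
          (fun i => PySem.Int.mod i (p : Int)) false)
        (some (r * spr)) (some ((r + 1) * spr)))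
      PySem.Dict.empty (fun a _ => PySem.Dict.contains_empty a) hnodup]
  apply List.map_congr_left
  intro r hr
  obtain ⟨hr0, hrp⟩ := PySem.List.mem_pyRange_one.mp hr
  simp only [Prod.mk.injEq, true_and]
  rcases (by omega : spr ≤ 0 ∨ 0 < spr) with hs | hs
  · -- no stages at all: both lists are empty
    rw [PySem.List.pyRange_one_eq_nil hs,
      PySem.List.pyRange_one_eq_nil (by nlinarith : (p : Int) * spr ≤ 0)]
    have h0 : PySem.List.sorted ([] : List Int) (fun i => PySem.Int.mod i (p : Int)) false = [] := rfl
    rw [h0]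
    simp [PySem.List.slice]
  · -- the main case: slice out block r of the sorted order
    set s' := spr.toNat with hs'
    have hsprc : (s' : Int) = spr := Int.toNat_of_nonneg hs.le
    set r' := r.toNat with hr'
    have hrc : (r' : Int) = r := Int.toNat_of_nonneg hr0
    have hrn : r' < p := by omega
    -- characterize the sorted order as concatenated residue classes
    have hsorted : PySem.List.sorted (PySem.List.pyRange 0 ((p : Int) * spr))
        (fun i => PySem.Int.mod i (p : Int)) false
        = (PySem.List.pyRange 0 (p : Int)).flatMap
            (fun k => (PySem.List.pyRange 0 ((p : Int) * spr)).filter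
              (fun i => PySem.Int.mod i (p : Int) == k)) := by
      apply pv_stable_sort_classes (fun i => PySem.Int.mod i (p : Int))
        (PySem.List.pyRange 0 (p : Int)) (PySem.List.pairwise_lt_pyRange_one 0 p)
      intro x _
      exact PySem.List.mem_pyRange_one.mpr ⟨(pv_mod_bounds x p hppos).1, (pv_mod_bounds x p hppos).2⟩
    -- each class k (0 ≤ k < p) is a block of length s'
    have hclass : ∀ k : Nat, k < p →
        (PySem.List.pyRange 0 ((p : Int) * spr)).filter
          (fun i => PySem.Int.mod i (p : Int) == (k : Int))
          = (List.range s').map (fun s : Nat => ((k : Int) + (s : Int) * p)) := by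
      intro k hk
      rw [← hsprc]
      exact pv_filter_range p s' k hk
    -- split the rank range at r and at r+1
    have hsplit : PySem.List.pyRange 0 (p : Int)
        = PySem.List.pyRange 0 r ++ (r :: PySem.List.pyRange (r + 1) (p : Int)) := by
      rw [PySem.List.pyRange_one_append 0 r (p : Int) hr0 hrp.le,
        PySem.List.pyRange_one_cons hrp]
    have hpre_len : ((PySem.List.pyRange 0 r).flatMap
        (fun k => (PySem.List.pyRange 0 ((p : Int) * spr)).filter
          (fun i => PySem.Int.mod i (p : Int) == k))).length = r' * s' := by
      rw [List.length_flatMap]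
      have hcongr : ∀ k ∈ PySem.List.pyRange 0 r,
          ((PySem.List.pyRange 0 ((p : Int) * spr)).filter
            (fun i => PySem.Int.mod i (p : Int) == k)).length = s' := by
        intro k hk
        obtain ⟨hk0, hkr⟩ := PySem.List.mem_pyRange_one.mp hk
        have hkc : ((k.toNat : Nat) : Int) = k := Int.toNat_of_nonneg hk0
        rw [← hkc, hclass k.toNat (by omega)]
        simp
      rw [List.map_congr_left hcongr]
      have hlen : (PySem.List.pyRange 0 r).length = r' := by
        rw [PySem.List.length_pyRange_one]; omega
      rw [List.map_const', hlen, List.sum_replicate, smul_eq_mul]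
  -- now compute the slice
    rw [hsorted, hsplit, List.flatMap_append, List.flatMap_cons]
    have hbounds1 : r * spr = ((r' * s' : Nat) : Int) := by push_cast; rw [hrc, hsprc]
    have hbounds2 : (r + 1) * spr = ((r' * s' : Nat) : Int) + ((s' : Nat) : Int) := by
      push_cast; rw [hrc, hsprc]; ring
    rw [hbounds1, hbounds2, PySem.List.slice_natCast_add, ← List.append_assoc]
    have hdrop : (((PySem.List.pyRange 0 r).flatMap
          (fun k => (PySem.List.pyRange 0 ((p : Int) * spr)).filter
            (fun i => PySem.Int.mod i (p : Int) == k)))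
        ++ ((PySem.List.pyRange 0 ((p : Int) * spr)).filter
            (fun i => PySem.Int.mod i (p : Int) == r))
        ++ ((PySem.List.pyRange (r + 1) (p : Int)).flatMap
          (fun k => (PySem.List.pyRange 0 ((p : Int) * spr)).filter
            (fun i => PySem.Int.mod i (p : Int) == k)))).drop (r' * s')
        = ((PySem.List.pyRange 0 ((p : Int) * spr)).filter
            (fun i => PySem.Int.mod i (p : Int) == r))
          ++ ((PySem.List.pyRange (r + 1) (p : Int)).flatMap
            (fun k => (PySem.List.pyRange 0 ((p : Int) * spr)).filter
              (fun i => PySem.Int.mod i (p : Int) == k))) := by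
      rw [List.append_assoc, ← hpre_len, List.drop_left]
    rw [hdrop]
    have hclass_r : (PySem.List.pyRange 0 ((p : Int) * spr)).filter
        (fun i => PySem.Int.mod i (p : Int) == r)
        = (List.range s').map (fun s : Nat => ((r' : Int) + (s : Int) * p)) := by
      rw [← hrc]
      exact hclass r' hrn
    rw [hclass_r]
    have htake : ((List.range s').map (fun s : Nat => ((r' : Int) + (s : Int) * p))
        ++ ((PySem.List.pyRange (r + 1) (p : Int)).flatMap
          (fun k => (PySem.List.pyRange 0 ((p : Int) * spr)).filter
            (fun i => PySem.Int.mod i (p : Int) == k)))).take s'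
        = (List.range s').map (fun s : Nat => ((r' : Int) + (s : Int) * p)) := by
      rw [List.take_append_of_le_length (by simp)]
      simp
    rw [htake]
    -- A's comprehension is the same arithmetic progression
    rw [PySem.List.pyRange_one, List.map_map]
    have : ((spr - 0).toNat) = s' := by omega
    rw [this]
    apply List.map_congr_left
    intro t _
    simp [Function.comp, hrc]

-- ===== VERDICT (by name: the statement is the Claim_ definition above) =====
theorem assign_logical_stages_to_pp_rank_spec : Claim_equal_assign_logical_stages_to_pp_rank := by
  intro s pp spr _
  unfold Spec_assign_logical_stages_to_pp_rank
  unfold assign_logical_stages_to_pp_rank assign_logical_stages_to_pp_rank_alt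
  by_cases hname : (s == "ZBVZeroBubble" || s == "DualPipeV") = true
  · simp only [hname, if_true]
    rw [if_neg (by decide)]
  · simp only [hname, Bool.false_eq_true, if_false]
    rw [if_pos (by decide)]
    rcases (by omega : pp ≤ 0 ∨ 0 < pp) with hp0 | hp0
    · rw [if_pos hp0, PySem.List.pyRange_one_eq_nil hp0]
      rfl
    · rw [if_neg (by omega)]
      have hmain := pv_loop_branch pp.toNat (by omega) spr
      rw [Int.toNat_of_nonneg (le_of_lt hp0)] at hmain
      exact hmain
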